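-- pv_equiv track=rewrite | github.com/nanashi0109/advanced_python_practices | homework_03/hw_03_part_1.py | rotation_string
-- ===== SOURCE A (Python) =====
-- def rotation_string(line, n):
--     if len(line) < n:
--         raise ValueError("length line less then second argument")
--
--     def bulkhead_letters(lst: str, max_count: int):
--         if len(lst) >= max_count:
--             yield lst
--             return
--
--         for j in line:
--             if j not in lst:
--                 yield from bulkhead_letters(lst+j, max_count)
--
--     for k in range(1, n+1, 1):
--         yield from bulkhead_letters("", k)
-- ===== SOURCE B (Python) =====
-- def rotation_string(line, n):
--     if len(line) < n:
--         raise ValueError("length line less then second argument")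
--
--     level = [""]
--     for _ in range(1, n + 1, 1):
--         level = [w + c for w in level for c in line if c not in w]
--         yield from level
-- ===== Notes on version B (the rewrite author's own statement) =====
-- stated objective: alternative
-- what changed: Replaces the per-k pruning DFS generator recursion with a single breadth-first pass that keeps one frontier list, extends it level by level, and yields each level once (no re-derivation of shorter prefixes for every k).
-- outside the precondition, e.g. on rotation_string('ab', 3): A raises ValueError, B raises ValueError
import Mathlib
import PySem

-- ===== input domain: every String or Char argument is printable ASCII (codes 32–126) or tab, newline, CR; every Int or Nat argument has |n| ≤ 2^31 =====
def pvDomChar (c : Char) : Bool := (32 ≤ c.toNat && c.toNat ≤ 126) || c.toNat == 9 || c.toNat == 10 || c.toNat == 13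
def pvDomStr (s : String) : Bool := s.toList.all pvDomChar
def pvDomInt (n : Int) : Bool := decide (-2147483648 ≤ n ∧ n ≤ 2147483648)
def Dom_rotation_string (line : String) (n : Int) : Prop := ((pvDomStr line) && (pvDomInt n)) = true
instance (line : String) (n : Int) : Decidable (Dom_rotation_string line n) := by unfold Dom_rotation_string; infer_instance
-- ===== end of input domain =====

-- B replaces the per-k pruning DFS recursion with a single breadth-first frontier pass (alternative decomposition, same output).

-- ===== PORT A =====
-- inner generator bulkhead_letters, over List Char; yields become singleton lists
def bulkheadLetters (chars : List Char) (lst : List Char) (maxCount : Int) : List String :=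
  if (lst.length : Int) ≥ maxCount then [String.ofList lst]
  else chars.flatMap (fun j => if j ∈ lst then [] else bulkheadLetters chars (lst ++ [j]) maxCount)
termination_by (maxCount - lst.length).toNat
decreasing_by simp_all; omega

def rotation_string (line : String) (n : Int) : List String :=
  if ((line.toList.length : Int)) < n then []   -- Python raises ValueError here; excluded by Pre_
  else (PySem.List.pyRange 1 (n+1) 1).flatMap (fun k => bulkheadLetters line.toList [] k)

-- ===== PORT B =====
def rotation_string_alt (line : String) (n : Int) : List String :=
  if ((line.toList.length : Int)) < n then []   -- Python raises ValueError here; excluded by Pre_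
  else
    ((PySem.List.pyRange 1 (n+1) 1).foldl
      (fun (st : List (List Char) × List String) (_ : Int) =>
        let level := st.1.flatMap (fun w => line.toList.flatMap (fun c => if c ∈ w then [] else [w ++ [c]]))
        (level, st.2 ++ level.map String.ofList))
      ([[]], [])).2

-- ===== PRECONDITION & SPEC =====
-- A raises ValueError exactly when len(line) < n
def Pre_rotation_string (line : String) (n : Int) : Prop := n ≤ (line.toList.length : Int)
instance (line : String) (n : Int) : Decidable (Pre_rotation_string line n) := by unfold Pre_rotation_string; infer_instance
def pvWitness_rotation_string : String × Int := ("abc", 2)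

def Spec_rotation_string (line : String) (n : Int) (out : List String) : Prop := out = rotation_string_alt line n
instance (line : String) (n : Int) (out : List String) : Decidable (Spec_rotation_string line n out) := by unfold Spec_rotation_string; infer_instance

-- ===== CLAIM (what is proved, stated in full; the proofs are below) =====
def Claim_equal_rotation_string : Prop := ∀ (line : String) (n : Int), Dom_rotation_string line n → Pre_rotation_string line n → Spec_rotation_string line n (rotation_string line n)

-- ===== LEMMAS AND PROOFS =====

-- one breadth-first extension step (B's frontier update)
def extStep (chars : List Char) (ws : List (List Char)) : List (List Char) :=
  ws.flatMap (fun w => chars.flatMap (fun c => if c ∈ w then [] else [w ++ [c]]))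

-- concatenation of the next m yielded levels starting from frontier st
def auxLevels (chars : List Char) (st : List (List Char)) : Nat → List String
  | 0 => []
  | m+1 => ((extStep chars st).map String.ofList) ++ auxLevels chars (extStep chars st) m

theorem bulkhead_levels (chars : List Char) (m : Nat) (k : Int)
    (ws : List (List Char)) (hws : ∀ w ∈ ws, (w.length : Int) + m = k) :
    ws.flatMap (fun w => bulkheadLetters chars w k) = ((extStep chars)^[m] ws).map String.ofList := by
  induction m generalizing ws with
  | zero =>
    simp only [Function.iterate_zero, id]
    induction ws with
    | nil => simp
    | cons w ws ih =>
      have hw := hws w (by simp)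
      simp only [List.flatMap_cons, List.map_cons]
      rw [ih (fun w' hw' => hws w' (by simp [hw']))]
      rw [bulkheadLetters]
      simp only [ge_iff_le]
      rw [if_pos (by omega)]
      simp
  | succ m ih =>
    have h1 : ws.flatMap (fun w => bulkheadLetters chars w k)
        = (extStep chars ws).flatMap (fun w => bulkheadLetters chars w k) := by
      unfold extStep
      rw [List.flatMap_assoc]
      apply List.flatMap_congr
      intro w hw
      have hlen := hws w hw
      rw [bulkheadLetters]
      rw [if_neg (by simp only [ge_iff_le]; omega)]
      rw [List.flatMap_assoc]
      apply List.flatMap_congr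
      intro c _
      by_cases hc : c ∈ w <;> simp [hc]
    rw [h1, ih (extStep chars ws) ?_, ← Function.iterate_succ_apply]
    intro w' hw'
    unfold extStep at hw'
    simp only [List.mem_flatMap] at hw'
    obtain ⟨w, hw, c, hc, hmem⟩ := hw'
    have := hws w hw
    by_cases h : c ∈ w
    · simp [h] at hmem
    · simp [h] at hmem
      subst hmem
      simp
      omega

theorem a_as_levels (chars : List Char) (m j : Nat) :
    ((List.range m).map (fun i => ((j + i + 1 : Nat) : Int))).flatMap
        (fun k => bulkheadLetters chars [] k)
      = auxLevels chars ((extStep chars)^[j] [[]]) m := by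
  induction m generalizing j with
  | zero => simp [auxLevels]
  | succ m ih =>
    rw [List.range_succ_eq_map]
    simp only [List.map_cons, List.flatMap_cons, List.map_map]
    have hblock : bulkheadLetters chars [] ((j + 0 + 1 : Nat) : Int)
        = ((extStep chars)^[j+1] [[]]).map String.ofList := by
      have h := bulkhead_levels chars (j+1) ((j + 0 + 1 : Nat) : Int) [[]]
        (by intro w hw; simp at hw; subst hw; simp)
      simpa using h
    rw [hblock]
    have hcomp : ((fun i => ((j + i + 1 : Nat) : Int)) ∘ Nat.succ)
        = (fun i => (((j+1) + i + 1 : Nat) : Int)) := by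
      funext i; simp [Function.comp, Nat.succ_eq_add_one]; ring
    rw [hcomp, ih (j+1)]
    show _ = auxLevels chars ((extStep chars)^[j] [[]]) (m+1)
    rw [auxLevels, ← Function.iterate_succ_apply' (extStep chars) j [[]]]

theorem b_fold_levels (chars : List Char) (l : List Int) (st : List (List Char)) (acc : List String) :
    (l.foldl
      (fun (p : List (List Char) × List String) (_ : Int) =>
        let level := p.1.flatMap (fun w => chars.flatMap (fun c => if c ∈ w then [] else [w ++ [c]]))
        (level, p.2 ++ level.map String.ofList))
      (st, acc)).2 = acc ++ auxLevels chars st l.length := by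
  induction l generalizing st acc with
  | nil => simp [auxLevels]
  | cons x l ih =>
    simp only [List.foldl_cons, List.length_cons]
    rw [ih]
    rw [auxLevels]
    show acc ++ (extStep chars st).map String.ofList ++ auxLevels chars (extStep chars st) l.length = _
    rw [List.append_assoc]

-- ===== VERDICT (by name: the statement is the Claim_ definition above) =====
theorem rotation_string_spec : Claim_equal_rotation_string := by
  intro line n _hdom hpre
  unfold Spec_rotation_string rotation_string rotation_string_alt
  have hng : ¬ ((line.toList.length : Int)) < n := by
    unfold Pre_rotation_string at hpre; omega
  rw [if_neg hng, if_neg hng]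
  rw [b_fold_levels line.toList (PySem.List.pyRange 1 (n+1) 1) [[]] []]
  rw [PySem.List.length_pyRange_one]
  rw [PySem.List.pyRange_one]
  have hmap : (List.range ((n+1)-1).toNat).map (fun k : Nat => (1 : Int) + k)
      = (List.range ((n+1)-1).toNat).map (fun i : Nat => ((0 + i + 1 : Nat) : Int)) := by
    apply List.map_congr_left; intro i _; push_cast; ring
  rw [hmap, a_as_levels line.toList ((n+1)-1).toNat 0]
  simp
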